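-- pv_equiv track=rewrite | github.com/ThePiep/adventofcode | 2025/day1/prog.py | part2
-- ===== SOURCE A (Python) =====
-- def part2(instr: list[tuple[str, int]]) -> int:
--     p = 50  # pointer
--     c = 0  # count
--     for dir, num in instr:
--         c += num // 100  # add rotations
--         num = num % 100
--         cp = p
--         np = p + (num if dir == "R" else -num)
--         p = np % 100
--         if (cp != 0 and np != p) or (p == 0 and cp != 0):
--             c += 1
--     return c
-- ===== SOURCE B (Python) =====
-- def part2(instr: list[tuple[str, int]]) -> int:
--     pos = 50  # absolute (non-modular) coordinate
--     c = 0
--     for dir, num in instr: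
--         if dir == "R":
--             new = pos + num
--             # multiples of 100 in the half-open interval (pos, new]
--             c += new // 100 - pos // 100
--         else:
--             new = pos - num
--             # multiples of 100 in the half-open interval [new, pos)
--             c += (pos - 1) // 100 - (new - 1) // 100
--         pos = new
--     return c
-- ===== Notes on version B (the rewrite author's own statement) =====
-- stated objective: simpler
-- what changed: B keeps an absolute (non-modular) position and counts boundary crossings per move with one floor-division formula on the interval endpoints, replacing A's 0..99 pointer with separate rotation count, modular wrap and two-clause branch test.
import Mathlib
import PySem

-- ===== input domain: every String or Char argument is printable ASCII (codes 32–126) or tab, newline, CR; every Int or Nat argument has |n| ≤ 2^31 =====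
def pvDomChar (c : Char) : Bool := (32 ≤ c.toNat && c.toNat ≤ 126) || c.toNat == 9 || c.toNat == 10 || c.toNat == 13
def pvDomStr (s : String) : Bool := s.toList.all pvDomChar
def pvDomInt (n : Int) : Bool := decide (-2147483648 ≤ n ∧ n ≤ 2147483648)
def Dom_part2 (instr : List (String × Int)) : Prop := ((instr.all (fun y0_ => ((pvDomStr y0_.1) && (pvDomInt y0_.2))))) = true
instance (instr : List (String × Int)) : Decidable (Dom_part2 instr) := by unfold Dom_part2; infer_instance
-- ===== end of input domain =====

-- B maintains an absolute coordinate and counts crossings by floor division on the move's interval; objective: simpler.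


-- ===== PORT A =====
-- one iteration of A's loop; state = (p, c)
def part2Step (st : Int × Int) (pr : String × Int) : Int × Int :=
  let c := st.2 + PySem.Int.floordiv pr.2 100
  let num := PySem.Int.mod pr.2 100
  let cp := st.1
  let np := cp + (if pr.1 == "R" then num else -num)
  let p := PySem.Int.mod np 100
  let c := if (cp ≠ 0 ∧ np ≠ p) ∨ (p = 0 ∧ cp ≠ 0) then c + 1 else c
  (p, c)

def part2 (instr : List (String × Int)) : Int :=
  (instr.foldl part2Step (50, 0)).2

-- ===== PORT B =====
-- one iteration of B's loop; state = (pos, c)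
def part2AltStep (st : Int × Int) (pr : String × Int) : Int × Int :=
  if pr.1 == "R" then
    let new := st.1 + pr.2
    (new, st.2 + (PySem.Int.floordiv new 100 - PySem.Int.floordiv st.1 100))
  else
    let new := st.1 - pr.2
    (new, st.2 + (PySem.Int.floordiv (st.1 - 1) 100 - PySem.Int.floordiv (new - 1) 100))

def part2_alt (instr : List (String × Int)) : Int :=
  (instr.foldl part2AltStep (50, 0)).2

-- ===== PRECONDITION & SPEC =====
def Spec_part2 (instr : List (String × Int)) (out : Int) : Prop := out = part2_alt instr
instance (instr : List (String × Int)) (out : Int) : Decidable (Spec_part2 instr out) := by unfold Spec_part2; infer_instance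

-- ===== CLAIM (what is proved, stated in full; the proofs are below) =====
def Claim_equal_part2 : Prop := ∀ (instr : List (String × Int)), Dom_part2 instr → Spec_part2 instr (part2 instr)

-- ===== LEMMAS AND PROOFS =====

-- one step: A from the reduced pointer equals B from the absolute coordinate
theorem part2Step_sim (pos c : Int) (pr : String × Int) :
    part2Step (pos % 100, c) pr =
      ((part2AltStep (pos, c) pr).1 % 100, (part2AltStep (pos, c) pr).2) := by
  rcases pr with ⟨d, num⟩
  simp only [part2Step, part2AltStep]
  by_cases hd : d == "R" <;>
    simp only [hd, if_true, if_false, Bool.false_eq_true] <;>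
    rw [PySem.Int.floordiv_eq_ediv_of_pos (a := num) (by norm_num),
        PySem.Int.mod_eq_emod_of_pos (a := num) (by norm_num)] <;>
    rw [PySem.Int.mod_eq_emod_of_pos (by norm_num)] <;>
    [rw [PySem.Int.floordiv_eq_ediv_of_pos (a := pos + num) (by norm_num),
         PySem.Int.floordiv_eq_ediv_of_pos (a := pos) (by norm_num)];
     rw [PySem.Int.floordiv_eq_ediv_of_pos (a := pos - 1) (by norm_num),
         PySem.Int.floordiv_eq_ediv_of_pos (a := pos - num - 1) (by norm_num)]] <;>
    · rw [Prod.mk.injEq]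
      refine ⟨by omega, ?_⟩
      split_ifs with h <;> omega

theorem part2_loop (l : List (String × Int)) (pos c : Int) :
    (l.foldl part2Step (pos % 100, c)).2 = (l.foldl part2AltStep (pos, c)).2 := by
  induction l generalizing pos c with
  | nil => rfl
  | cons pr l ih =>
      simp only [List.foldl_cons, part2Step_sim]
      exact ih _ _

-- ===== VERDICT (by name: the statement is the Claim_ definition above) =====
theorem part2_spec : Claim_equal_part2 := by
  intro instr _
  show part2 instr = part2_alt instr
  have h := part2_loop instr 50 0
  simpa [part2, part2_alt] using h
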